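-- pv_equiv track=rewrite | github.com/samip584/IW-assignment2 | 10.py | convert
-- ===== SOURCE A (Python) =====
-- def convert(str, separator):
--     temp = [str[0].lower()]
--     for i in str[1:]:
--         if i in ('ABCDEFGHIJKLMNOPQRSTUVWXYZ'):
--             temp.append(separator)
--             temp.append(i.lower())
--         else:
--             temp.append(i)
--
--     return ''.join(temp)
-- ===== SOURCE B (Python) =====
-- def convert(str, separator):
--     rest = str[1:]
--     cuts = [i for i, ch in enumerate(rest) if 'A' <= ch <= 'Z']
--     pieces = [rest[a:b] for a, b in zip([0] + cuts, cuts + [len(rest)])]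
--     lowered = pieces[:1] + [p[0].lower() + p[1:] for p in pieces[1:]]
--     return str[0].lower() + separator.join(lowered)
-- ===== Notes on version B (the rewrite author's own statement) =====
-- stated objective: alternative
-- what changed: A accumulates the output one character at a time with a branch; B instead computes the list of uppercase positions in str[1:], slices the tail into segments starting at those positions, lowercases each segment's leading character, and joins the segments with the separator (split-at-boundaries-and-join instead of per-character accumulation).
import Mathlib
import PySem

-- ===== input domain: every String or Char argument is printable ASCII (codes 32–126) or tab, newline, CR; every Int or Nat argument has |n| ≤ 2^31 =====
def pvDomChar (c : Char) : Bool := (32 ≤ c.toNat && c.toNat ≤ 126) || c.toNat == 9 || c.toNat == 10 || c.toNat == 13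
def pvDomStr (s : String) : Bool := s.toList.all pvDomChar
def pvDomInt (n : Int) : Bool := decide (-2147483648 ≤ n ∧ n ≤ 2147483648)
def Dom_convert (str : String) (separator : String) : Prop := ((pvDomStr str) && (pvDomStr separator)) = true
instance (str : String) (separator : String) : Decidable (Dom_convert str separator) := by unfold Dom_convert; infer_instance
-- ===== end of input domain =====

-- B replaces A's per-character branch-and-append loop by a split-and-join algorithm:
-- compute the uppercase positions of str[1:], slice the tail into segments starting
-- at those positions, lowercase each segment's head, and join with the separator.
-- Objective: alternative (no speed claim).

-- ===== PORT A =====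
def convert (str : String) (separator : String) : String :=
  match PySem.Str.pyGet? str 0 with
  | none => ""          -- str[0] raises IndexError on the empty string; excluded by Pre_convert
  | some c0 =>
    PySem.Str.join ""
      ((PySem.Str.slice str (some 1) none).toList.foldl
        (fun temp i =>
          if "ABCDEFGHIJKLMNOPQRSTUVWXYZ".toList.contains i then
            (temp ++ [separator]) ++ [String.ofList [PySem.Chars.lowerChar i]]
          else temp ++ [String.ofList [i]])
        [String.ofList [PySem.Chars.lowerChar c0]])

-- ===== PORT B =====
def convert_alt (str : String) (separator : String) : String :=
  let rest := PySem.Str.slice str (some 1) none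
  -- cuts = [i for i, ch in enumerate(rest) if 'A' <= ch <= 'Z']
  let cuts : List Int :=
    ((PySem.List.enumerate rest.toList 0).filter
      (fun p => decide ('A' ≤ p.2) && decide (p.2 ≤ 'Z'))).map (fun p => p.1)
  -- pieces = [rest[a:b] for a, b in zip([0] + cuts, cuts + [len(rest)])]
  let pieces : List String :=
    (((0 : Int) :: cuts).zip (cuts ++ [PySem.Str.len rest])).map
      (fun ab => PySem.Str.slice rest (some ab.1) (some ab.2))
  -- lowered = pieces[:1] + [p[0].lower() + p[1:] for p in pieces[1:]]
  -- (p[0] can never raise here: every piece after the first starts at an uppercase position)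
  let lowered : List String :=
    PySem.List.slice pieces none (some 1) ++
      (PySem.List.slice pieces (some 1) none).map
        (fun p => (match PySem.Str.pyGet? p 0 with
                   | some c => String.ofList [PySem.Chars.lowerChar c]
                   | none => "") ++ PySem.Str.slice p (some 1) none)
  match PySem.Str.pyGet? str 0 with
  | none => ""          -- str[0] raises IndexError on the empty string; excluded by Pre_convert
  | some c0 => String.ofList [PySem.Chars.lowerChar c0] ++ PySem.Str.join separator lowered

-- ===== PRECONDITION & SPEC =====
-- Pre_ excludes only the empty string, on which A's str[0] raises IndexError.
def Pre_convert (str : String) (separator : String) : Prop := str ≠ ""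
instance (str : String) (separator : String) : Decidable (Pre_convert str separator) := by unfold Pre_convert; infer_instance
def pvWitness_convert : String × String := ("camelCaseWord", "_")
def Spec_convert (str : String) (separator : String) (out : String) : Prop := out = convert_alt str separator
instance (str : String) (separator : String) (out : String) : Decidable (Spec_convert str separator out) := by unfold Spec_convert; infer_instance

-- ===== CLAIM (what is proved, stated in full; the proofs are below) =====
def Claim_equal_convert : Prop := ∀ (str : String) (separator : String), Dom_convert str separator → Pre_convert str separator → Spec_convert str separator (convert str separator)

-- ===== LEMMAS AND PROOFS =====

-- the uppercase test both programs use, as a Bool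
def upb (c : Char) : Bool := decide ('A' ≤ c) && decide (c ≤ 'Z')

-- per-character contribution both outputs are proved to flatten to
def fseg (sep : List Char) (c : Char) : List Char :=
  if upb c then sep ++ [PySem.Chars.lowerChar c] else [c]

-- prepend a char to the first segment (B's segment containing a fresh uppercase head)
def consHead (c : Char) : List (List Char) → List (List Char)
  | [] => [[c]]
  | h :: r => (c :: h) :: r

-- the segments B's slicing produces, described structurally
def chunks : List Char → List (List Char)
  | [] => [[]]
  | c :: t => if upb c then [] :: consHead c (chunks t) else consHead c (chunks t)

-- uppercase positions, counted from k
def upPosN : List Char → Nat → List Nat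
  | [], _ => []
  | c :: t, k => if upb c then k :: upPosN t (k+1) else upPosN t (k+1)

-- segments cut out of `full` at the ascending positions l, starting at a
def piecesOf (full : List Char) : Nat → List Nat → List (List Char)
  | a, [] => [full.drop a]
  | a, b :: r => ((full.drop a).take (b - a)) :: piecesOf full b r

-- lowercase the head of a segment
def lowfixL : List Char → List Char
  | [] => []
  | c :: t => PySem.Chars.lowerChar c :: t

-- B's `lowered` on the char-list level
def loweredL : List (List Char) → List (List Char)
  | [] => []
  | h :: r => h :: r.map lowfixL

lemma upList_eq : "ABCDEFGHIJKLMNOPQRSTUVWXYZ".toList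
    = ['A','B','C','D','E','F','G','H','I','J','K','L','M',
       'N','O','P','Q','R','S','T','U','V','W','X','Y','Z'] := by decide

lemma contains_eq (c : Char) :
    ("ABCDEFGHIJKLMNOPQRSTUVWXYZ".toList.contains c) = upb c := by
  rw [upList_eq]
  by_cases h : c ∈ ['A','B','C','D','E','F','G','H','I','J','K','L','M',
       'N','O','P','Q','R','S','T','U','V','W','X','Y','Z']
  · rw [List.contains_eq_mem, decide_eq_true h]
    have key : upb c = true := by fin_cases h <;> rfl
    exact key.symm
  · rw [List.contains_eq_mem, decide_eq_false h]
    by_cases hu : upb c = true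
    · exfalso
      apply h
      have hb : 65 ≤ c.toNat ∧ c.toNat ≤ 90 := by
        simp only [upb, Bool.and_eq_true, decide_eq_true_eq, Char.le_def] at hu
        exact ⟨hu.1, hu.2⟩
      have key : ∀ n ∈ List.range' 65 26, Char.ofNat n ∈ ['A','B','C','D','E','F','G','H','I','J','K','L','M',
       'N','O','P','Q','R','S','T','U','V','W','X','Y','Z'] := by decide
      have := key c.toNat (by rw [List.mem_range'_1]; omega)
      rwa [Char.ofNat_toNat] at this
    · simp [hu]

lemma chunks_ne_nil (cs : List Char) : chunks cs ≠ [] := by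
  cases cs with
  | nil => simp [chunks]
  | cons c t =>
    simp only [chunks]
    split_ifs
    · simp
    · cases h : chunks t <;> simp [consHead]

lemma upPosN_ge : ∀ (cs : List Char) (k b : Nat), b ∈ upPosN cs k → k ≤ b := by
  intro cs
  induction cs with
  | nil => intro k b h; simp [upPosN] at h
  | cons c t ih =>
    intro k b h
    simp only [upPosN] at h
    by_cases hc : upb c = true
    · rw [if_pos hc] at h
      rcases List.mem_cons.mp h with h | h
      · omega
      · have := ih (k+1) b h; omega
    · rw [if_neg hc] at h
      have := ih (k+1) b h; omega

-- the zip-of-bounds slicing computes piecesOf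
lemma zip_pieces (full : List Char) :
    ∀ (l : List Nat) (a : Nat),
      ((((a : Nat) : Int) :: l.map (fun n => ((n : Nat) : Int))).zip
          (l.map (fun n => ((n : Nat) : Int)) ++ [((full.length : Nat) : Int)])).map
        (fun ab => PySem.List.slice full (some ab.1) (some ab.2))
      = piecesOf full a l := by
  intro l
  induction l with
  | nil =>
    intro a
    simp only [List.map_nil, List.nil_append, List.zip_cons_cons, List.zip_nil_left,
      List.map_cons, List.map_nil, piecesOf]
    rw [PySem.List.slice_natCast]
    congr 1
    apply List.take_of_length_le
    simp
  | cons b r ih =>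
    intro a
    simp only [List.map_cons, List.cons_append, List.zip_cons_cons, List.map_cons, piecesOf]
    rw [PySem.List.slice_natCast, ih b]

-- the enumerate/filter comprehension computes upPosN
lemma cuts_eq : ∀ (cs : List Char) (k : Nat),
    ((PySem.List.enumerate cs ((k : Nat) : Int)).filter
        (fun p => decide ('A' ≤ p.2) && decide (p.2 ≤ 'Z'))).map (fun p => p.1)
      = (upPosN cs k).map (fun n => ((n : Nat) : Int)) := by
  intro cs
  induction cs with
  | nil => intro k; simp [PySem.List.enumerate_nil, upPosN]
  | cons c t ih =>
    intro k
    rw [PySem.List.enumerate_cons]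
    have hcast : ((k : Nat) : Int) + 1 = (((k + 1 : Nat)) : Int) := by push_cast; ring
    simp only [upPosN, List.filter_cons]
    by_cases hc : upb c = true
    · have hc' : (decide ('A' ≤ c) && decide (c ≤ 'Z')) = true := hc
      rw [if_pos hc', if_pos hc, List.map_cons, hcast, ih (k+1)]
      rfl
    · have hc' : (decide ('A' ≤ c) && decide (c ≤ 'Z')) = false := by
        simpa [upb] using hc
      rw [if_neg (by simp [hc']), if_neg hc, hcast, ih (k+1)]

lemma piecesOf_consHead (full : List Char) :
    ∀ (l : List Nat) (k : Nat) (c : Char),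
      full.drop k = c :: full.drop (k+1) → (∀ b ∈ l, k + 1 ≤ b) →
      piecesOf full k l = consHead c (piecesOf full (k+1) l) := by
  intro l
  induction l with
  | nil =>
    intro k c hdrop _
    simp [piecesOf, consHead, hdrop]
  | cons b r _
  =>
    intro k c hdrop hge
    have hb : k + 1 ≤ b := hge b (List.mem_cons_self ..)
    simp only [piecesOf, consHead, hdrop]
    have h1 : b - k = (b - (k+1)) + 1 := by omega
    rw [h1, List.take_succ_cons]

-- the slicing at the uppercase positions produces exactly the structural chunks
lemma pieces_chunks (full : List Char) :
    ∀ (cs : List Char) (k : Nat), full.drop k = cs →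
      piecesOf full k (upPosN cs k) = chunks cs := by
  intro cs
  induction cs with
  | nil => intro k h; simp [upPosN, piecesOf, chunks, h]
  | cons c t ih =>
    intro k h
    have htail : full.drop (k+1) = t := by
      rw [← List.tail_drop, h, List.tail_cons]
    have hdrop : full.drop k = c :: full.drop (k+1) := by rw [h, htail]
    have hge : ∀ b ∈ upPosN t (k+1), k + 1 ≤ b := fun b hb => upPosN_ge t (k+1) b hb
    simp only [upPosN, chunks]
    by_cases hc : upb c = true
    · rw [if_pos hc, if_pos hc]
      simp only [piecesOf, hdrop]
      rw [Nat.sub_self, List.take_zero]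
      rw [piecesOf_consHead full _ k c hdrop hge, ih (k+1) htail]
    · rw [if_neg hc, if_neg hc]
      rw [piecesOf_consHead full _ k c hdrop hge, ih (k+1) htail]

-- join with a leading element, flattened
lemma join_cons_flat (sep : List Char) (x : List Char) :
    ∀ xs, PySem.Chars.join sep (x :: xs) = x ++ xs.flatMap (fun y => sep ++ y) := by
  intro xs
  induction xs generalizing x with
  | nil => simp [PySem.Chars.join_singleton]
  | cons y ys ih =>
    rw [PySem.Chars.join_cons_cons, ih y]
    simp [List.append_assoc]

-- the joined lowered chunks flatten to the per-character contributions
lemma join_chunks (sep : List Char) :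
    ∀ (cs : List Char),
      PySem.Chars.join sep (loweredL (chunks cs)) = cs.flatMap (fseg sep) := by
  intro cs
  induction cs with
  | nil => simp [chunks, loweredL, PySem.Chars.join_singleton]
  | cons c t ih =>
    obtain ⟨h, r, hchunks⟩ : ∃ h r, chunks t = h :: r := by
      cases hx : chunks t with
      | nil => exact absurd hx (chunks_ne_nil t)
      | cons a l => exact ⟨a, l, rfl⟩
    rw [hchunks] at ih
    simp only [loweredL, join_cons_flat] at ih
    simp only [chunks, List.flatMap_cons, fseg]
    by_cases hc : upb c = true
    · rw [if_pos hc, if_pos hc, hchunks]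
      simp only [consHead, loweredL, List.map_cons, lowfixL]
      rw [join_cons_flat]
      simp only [List.flatMap_cons, List.nil_append, ← ih]
      simp
    · rw [if_neg hc, if_neg hc, hchunks]
      simp only [consHead, loweredL]
      rw [join_cons_flat]
      rw [← ih]
      simp

-- toList of B's per-piece lowering
lemma lowfix_toList (p : String) :
    ((match PySem.Str.pyGet? p 0 with
      | some c => String.ofList [PySem.Chars.lowerChar c]
      | none => "") ++ PySem.Str.slice p (some 1) none).toList = lowfixL p.toList := by
  have hget : PySem.Str.pyGet? p 0 = p.toList[0]? := by
    have := PySem.Str.pyGet?_natCast p 0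
    simpa using this
  have hslice : (PySem.Str.slice p (some 1) none).toList = p.toList.tail := by
    rw [PySem.Str.toList_slice, PySem.Chars.slice_eq_listSlice, PySem.List.slice_from_one]
  cases hp : p.toList with
  | nil =>
    rw [hget]
    simp [hp, hslice, lowfixL]
  | cons c t =>
    rw [hget]
    simp [hp, String.toList_append, hslice, lowfixL]

-- A's flattened accumulator contribution per character
lemma a_seg_toList (sep : String) (i : Char) :
    (((if "ABCDEFGHIJKLMNOPQRSTUVWXYZ".toList.contains i then
          [sep, String.ofList [PySem.Chars.lowerChar i]]
        else [String.ofList [i]]).map String.toList).flatten) = fseg sep.toList i := by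
  rw [contains_eq, fseg]
  by_cases h : upb i = true
  · rw [if_pos h, if_pos h]; simp
  · rw [if_neg h, if_neg h]; simp

lemma join_empty_flatten : ∀ (xss : List (List Char)),
    PySem.Chars.join [] xss = xss.flatten := by
  intro xss
  cases xss with
  | nil => simp [PySem.Chars.join_nil]
  | cons x xs => rw [join_cons_flat]; simp

-- A's flattened accumulator contributions
lemma flat_eq (sep : String) : ∀ (cs : List Char),
    (((cs.flatMap (fun i =>
        if "ABCDEFGHIJKLMNOPQRSTUVWXYZ".toList.contains i then
          [sep, String.ofList [PySem.Chars.lowerChar i]]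
        else [String.ofList [i]])).map String.toList).flatten)
      = cs.flatMap (fseg sep.toList) := by
  intro cs
  induction cs with
  | nil => simp
  | cons i t ih =>
    simp only [List.flatMap_cons, List.map_append, List.flatten_append, ih]
    congr 1
    exact a_seg_toList sep i

-- A's output, characterised
lemma convert_toList (str sep : String) (c0 : Char)
    (hget : PySem.Str.pyGet? str 0 = some c0) :
    (convert str sep).toList =
      PySem.Chars.lowerChar c0 ::
        (PySem.Str.slice str (some 1) none).toList.flatMap (fseg sep.toList) := by
  unfold convert
  rw [hget]
  dsimp only
  have hstep : (fun (temp : List String) (i : Char) =>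
      if "ABCDEFGHIJKLMNOPQRSTUVWXYZ".toList.contains i then
        (temp ++ [sep]) ++ [String.ofList [PySem.Chars.lowerChar i]]
      else temp ++ [String.ofList [i]])
    = fun temp i => temp ++
        (if "ABCDEFGHIJKLMNOPQRSTUVWXYZ".toList.contains i
         then [sep, String.ofList [PySem.Chars.lowerChar i]]
         else [String.ofList [i]]) := by
    funext t i; split_ifs <;> simp
  rw [hstep, PySem.List.foldl_append_eq_flatMap, PySem.Str.toList_join]
  have hnil : ("" : String).toList = [] := by decide
  rw [hnil, join_empty_flatten]
  simp only [List.map_append, List.flatten_append]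
  rw [flat_eq]
  simp

-- B's pieces, mapped to char lists, are the structural chunks
lemma pieces_map (rest : String) :
    ((((0 : Int) ::
          (((PySem.List.enumerate rest.toList 0).filter
              (fun p => decide ('A' ≤ p.2) && decide (p.2 ≤ 'Z'))).map (fun p => p.1))).zip
        ((((PySem.List.enumerate rest.toList 0).filter
              (fun p => decide ('A' ≤ p.2) && decide (p.2 ≤ 'Z'))).map (fun p => p.1)) ++
          [PySem.Str.len rest])).map
        (fun ab => PySem.Str.slice rest (some ab.1) (some ab.2))).map String.toList
      = chunks rest.toList := by
  have hcuts : ((PySem.List.enumerate rest.toList 0).filter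
        (fun p => decide ('A' ≤ p.2) && decide (p.2 ≤ 'Z'))).map (fun p => p.1)
      = (upPosN rest.toList 0).map (fun n => ((n : Nat) : Int)) := by
    have := cuts_eq rest.toList 0
    simpa using this
  rw [hcuts, PySem.Str.len_eq, List.map_map]
  have hfun : (String.toList ∘ fun ab : Int × Int => PySem.Str.slice rest (some ab.1) (some ab.2))
      = fun ab : Int × Int => PySem.List.slice rest.toList (some ab.1) (some ab.2) := by
    funext ab
    simp [Function.comp, PySem.Str.toList_slice, PySem.Chars.slice_eq_listSlice]
  rw [hfun]
  have h0 : (0 : Int) = ((0 : Nat) : Int) := rfl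
  rw [h0, zip_pieces rest.toList (upPosN rest.toList 0) 0,
    pieces_chunks rest.toList rest.toList 0 (by simp)]

-- joining B's lowered pieces, given that the pieces are the chunks
lemma lowered_join (rest sep : String) (P : List String)
    (hP : P.map String.toList = chunks rest.toList) :
    (PySem.Str.join sep
        (PySem.List.slice P none (some 1) ++
          (PySem.List.slice P (some 1) none).map
            (fun p => (match PySem.Str.pyGet? p 0 with
                       | some c => String.ofList [PySem.Chars.lowerChar c]
                       | none => "") ++ PySem.Str.slice p (some 1) none))).toList
      = rest.toList.flatMap (fseg sep.toList) := by
  obtain ⟨p0, ps, hps⟩ : ∃ p0 ps, P = p0 :: ps := by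
    cases hx : P with
    | nil =>
      exfalso
      apply chunks_ne_nil rest.toList
      rw [← hP, hx]
      rfl
    | cons a l => exact ⟨a, l, rfl⟩
  subst hps
  have htake : PySem.List.slice (p0 :: ps) none (some 1) = [p0] := by
    rw [PySem.List.slice_to _ (by norm_num : (0:Int) ≤ 1)]
    rfl
  have hdrop : PySem.List.slice (p0 :: ps) (some 1) none = ps := by
    rw [PySem.List.slice_from_one, List.tail_cons]
  rw [htake, hdrop, PySem.Str.toList_join]
  have hlowered : ([p0] ++ ps.map (fun p =>
        (match PySem.Str.pyGet? p 0 with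
         | some c => String.ofList [PySem.Chars.lowerChar c]
         | none => "") ++ PySem.Str.slice p (some 1) none)).map String.toList
      = loweredL (chunks rest.toList) := by
    rw [← hP]
    simp only [List.map_cons, List.cons_append, List.nil_append, List.map_map, loweredL]
    congr 1
    apply List.map_congr_left
    intro p _
    exact lowfix_toList p
  rw [hlowered, join_chunks sep.toList rest.toList]

-- B's output, characterised
set_option maxHeartbeats 1000000 in
lemma convert_alt_toList (str sep : String) (c0 : Char)
    (hget : PySem.Str.pyGet? str 0 = some c0) :
    (convert_alt str sep).toList =
      PySem.Chars.lowerChar c0 ::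
        (PySem.Str.slice str (some 1) none).toList.flatMap (fseg sep.toList) := by
  unfold convert_alt
  rw [hget]
  dsimp only
  rw [String.toList_append, String.toList_ofList,
    lowered_join (PySem.Str.slice str (some 1) none) sep _
      (pieces_map (PySem.Str.slice str (some 1) none))]
  rfl

-- ===== VERDICT (by name: the statement is the Claim_ definition above) =====
theorem convert_spec : Claim_equal_convert := by
  unfold Claim_equal_convert
  intro str sep _hdom hpre
  unfold Spec_convert
  obtain ⟨c0, hget⟩ : ∃ c0, PySem.Str.pyGet? str 0 = some c0 := by
    have h0 : PySem.Str.pyGet? str 0 = str.toList[0]? := by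
      have := PySem.Str.pyGet?_natCast str 0
      simpa using this
    cases hl : str.toList with
    | nil => exact absurd (String.toList_inj.mp (by simp [hl])) hpre
    | cons a l => exact ⟨a, by rw [h0, hl]; rfl⟩
  apply String.toList_inj.mp
  rw [convert_toList str sep c0 hget, convert_alt_toList str sep c0 hget]
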